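-- pv_equiv track=rewrite | github.com/PRETHIV-zz/Problem_Solver | 241_LONG_Length_SA.py | coutincr
-- ===== SOURCE A (Python) =====
-- def coutincr(a,i):
--     l=i+1
--     m=len(a)
--     if l==m:
--         return 1
--     else:
--         if a[i]<a[l]:
--             return 1+coutincr(a,i+1)
--         else:
--             return 1
-- ===== SOURCE B (Python) =====
-- def coutincr(a, i):
--     m = len(a)
--     for k in range(i, m - 1):
--         if not (a[k] < a[k + 1]):
--             return k - i + 1
--     return m - i
-- ===== Notes on version B (the rewrite author's own statement) =====
-- stated objective: alternative
-- what changed: Replaced the recursion over the suffix (1 + coutincr(a, i+1)) with a for-loop over range(i, len(a)-1) that returns the closed form k-i+1 at the first non-increasing pair and len(a)-i if none is found; no running count is maintained.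
import Mathlib
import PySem

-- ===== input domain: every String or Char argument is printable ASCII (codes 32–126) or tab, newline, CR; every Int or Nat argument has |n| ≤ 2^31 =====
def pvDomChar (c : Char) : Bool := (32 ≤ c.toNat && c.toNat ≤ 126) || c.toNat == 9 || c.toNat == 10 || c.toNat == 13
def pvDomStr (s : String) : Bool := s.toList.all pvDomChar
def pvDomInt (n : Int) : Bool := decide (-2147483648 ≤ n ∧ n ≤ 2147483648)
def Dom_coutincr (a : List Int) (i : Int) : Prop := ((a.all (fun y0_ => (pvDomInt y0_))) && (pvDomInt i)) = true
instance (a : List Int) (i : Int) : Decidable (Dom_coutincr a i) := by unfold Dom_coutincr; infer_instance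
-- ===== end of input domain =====

-- B replaces A's suffix recursion by a for-loop over range(i, len(a)-1) returning the
-- closed form k-i+1 at the first break (objective: alternative decomposition, same cost).

-- ===== PORT A =====
-- Literal port of A's recursion; the wildcard branch is Python's IndexError, excluded by Pre_.
def coutincr (a : List Int) (i : Int) : Int :=
  let l := i + 1
  let m := PySem.List.len a
  if l = m then 1
  else
    match hy : PySem.List.pyGet? a i, hy' : PySem.List.pyGet? a l with
    | some x, some y => if x < y then 1 + coutincr a (i + 1) else 1
    | _, _ => 1
termination_by (PySem.List.len a - i).toNat
decreasing_by
  have hin : PySem.Raise.InRange a.length (i+1) := by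
    by_contra hc
    have hn := (PySem.List.pyGet?_eq_none_iff (xs := a) (i := i+1)).mpr hc
    have hy2 : PySem.List.pyGet? a (i+1) = some y := hy'
    rw [hy2] at hn; simp at hn
  simp [PySem.Raise.InRange, PySem.List.len] at hin ⊢
  omega

-- ===== PORT B =====
-- Literal port of B's for-loop: structural recursion over the list range(i, m-1);
-- the none branches are Python's IndexError, excluded by Pre_.
def runScanB (a : List Int) (i : Int) : List Int → Int
  | [] => PySem.List.len a - i
  | k :: ks =>
      match PySem.List.pyGet? a k with
      | none => k - i + 1
      | some x =>
        match PySem.List.pyGet? a (k + 1) with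
        | none => k - i + 1
        | some y => if ¬ (x < y) then k - i + 1 else runScanB a i ks

def coutincr_alt (a : List Int) (i : Int) : Int :=
  runScanB a i (PySem.List.pyRange i (PySem.List.len a - 1) 1)

-- ===== PRECONDITION & SPEC =====
-- Pre_ is exactly the set of inputs on which Python A returns; elsewhere A raises IndexError:
-- indices inside Python's wraparound range -len(a) ≤ i < len(a), plus the l == m early
-- return reached by ([], -1).
def Pre_coutincr (a : List Int) (i : Int) : Prop :=
  (a = [] ∧ i = -1) ∨ (-(a.length : Int) ≤ i ∧ i < (a.length : Int))
instance (a : List Int) (i : Int) : Decidable (Pre_coutincr a i) := by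
  unfold Pre_coutincr; infer_instance
def pvWitness_coutincr : List Int × Int := ([1, 2, 2, 5], 0)

def Spec_coutincr (a : List Int) (i : Int) (out : Int) : Prop := out = coutincr_alt a i
instance (a : List Int) (i : Int) (out : Int) : Decidable (Spec_coutincr a i out) := by
  unfold Spec_coutincr; infer_instance

-- ===== CLAIM (what is proved, stated in full; the proofs are below) =====
def Claim_equal_coutincr : Prop := ∀ (a : List Int) (i : Int), Dom_coutincr a i → Pre_coutincr a i → Spec_coutincr a i (coutincr a i)

-- ===== LEMMAS AND PROOFS =====

-- Bridge: for every valid start position j, B's scan of range(j, m-1) computes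
-- (j - i) plus A's value at j (both sides read the same list positions and stop together).
theorem runScanB_eq (a : List Int) (i : Int) :
    ∀ j, ((a = [] ∧ j = -1) ∨ (-(a.length : Int) ≤ j ∧ j < (a.length : Int))) →
      runScanB a i (PySem.List.pyRange j ((a.length : Int) - 1) 1) = (j - i) + coutincr a j := by
  intro j hj
  fun_induction coutincr a j with
  | case1 j l m h =>
      simp only [l, m, PySem.List.len_eq] at h
      have hempty : PySem.List.pyRange j ((a.length : Int) - 1) 1 = [] :=
        PySem.List.pyRange_one_eq_nil (by omega)
      rw [hempty]
      simp only [runScanB, PySem.List.len_eq]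
      omega
  | case2 j l m h x y hx hy hlt ih =>
      -- a[j] < a[j+1]: range is j :: range(j+1, m-1)
      simp only [l, m, PySem.List.len_eq] at h hy
      have hy1 : PySem.Raise.InRange a.length (j + 1) := by
        by_contra hc
        have hn := (PySem.List.pyGet?_eq_none_iff (xs := a) (i := j + 1)).mpr hc
        rw [hy] at hn; simp at hn
      simp only [PySem.Raise.InRange] at hy1
      have hcons : PySem.List.pyRange j ((a.length : Int) - 1) 1
          = j :: PySem.List.pyRange (j + 1) ((a.length : Int) - 1) 1 :=
        PySem.List.pyRange_one_cons (by omega)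
      rw [hcons]
      simp only [runScanB, hx, hy]
      rw [if_neg (by simpa using hlt)]
      have hj1 : ((a = [] ∧ j + 1 = -1) ∨ (-(a.length : Int) ≤ j + 1 ∧ j + 1 < (a.length : Int))) := by
        right; omega
      rw [ih hj1]
      omega
  | case3 j l m h x y hx hy hlt =>
      simp only [l, m, PySem.List.len_eq] at h hy
      have hy1 : PySem.Raise.InRange a.length (j + 1) := by
        by_contra hc
        have hn := (PySem.List.pyGet?_eq_none_iff (xs := a) (i := j + 1)).mpr hc
        rw [hy] at hn; simp at hn
      simp only [PySem.Raise.InRange] at hy1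
      have hcons : PySem.List.pyRange j ((a.length : Int) - 1) 1
          = j :: PySem.List.pyRange (j + 1) ((a.length : Int) - 1) 1 :=
        PySem.List.pyRange_one_cons (by omega)
      rw [hcons]
      simp only [runScanB, hx, hy]
      simp [hlt]
  | case4 j l m h hnone =>
      -- IndexError branch of A: impossible for a valid j
      exfalso
      simp only [l, m, PySem.List.len_eq] at h hnone
      rcases hj with ⟨ha, hji⟩ | ⟨h1, h2⟩
      · subst ha; simp at h; omega
      · have hxj : PySem.Raise.InRange a.length j := by
          simp [PySem.Raise.InRange]; omega
        have hxj1 : PySem.Raise.InRange a.length (j + 1) := by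
          simp [PySem.Raise.InRange]; omega
        cases hgx : PySem.List.pyGet? a j with
        | none => exact absurd ((PySem.List.pyGet?_eq_none_iff (xs := a) (i := j)).mp hgx) (by simpa using hxj)
        | some x =>
          cases hgy : PySem.List.pyGet? a (j + 1) with
          | none => exact absurd ((PySem.List.pyGet?_eq_none_iff (xs := a) (i := j+1)).mp hgy) (by simpa using hxj1)
          | some y => exact hnone x y hgx hgy

-- ===== VERDICT (by name: the statement is the Claim_ definition above) =====
theorem coutincr_spec : Claim_equal_coutincr := by
  intro a i hdom hpre
  unfold Spec_coutincr coutincr_alt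
  simp only [PySem.List.len_eq]
  rw [runScanB_eq a i i hpre]
  omega
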